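-- pv_equiv track=rewrite | github.com/TailGuy/Telegraf-conf-generator | telegraf_conf_generator.py | sanitize_mqtt_topic
-- ===== SOURCE A (Python) =====
-- MQTT_TOPIC_EXCLUSION_CHARS = [
--     "+",    # Single-level wildcard character - illegal in topic names
--     "#",    # Multi-level wildcard character - illegal in topic names
--     "*",    # SMF wildcard character - causes interoperability issues
--     ">",    # SMF wildcard character - causes interoperability issues
--     "$"     # When used at start of topic - reserved for server implementation
-- ]
--
-- def sanitize_mqtt_topic(topic_name: str) -> str:
--     """
--     Sanitizes an MQTT topic name by replacing restricted characters.
--     """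
--     # Replace restricted characters
--     sanitized_name = topic_name
--     for char in MQTT_TOPIC_EXCLUSION_CHARS:
--         sanitized_name = sanitized_name.replace(char, '_')
--
--     # Handle leading $ if not a system topic
--     if sanitized_name.startswith("$") and not (
--         sanitized_name.startswith("$SYS/") or
--         sanitized_name.startswith("$share/") or
--         sanitized_name.startswith("$noexport/")
--     ):
--         sanitized_name = "_" + sanitized_name[1:]
--
--     return sanitized_name
-- ===== SOURCE B (Python) =====
-- RESTRICTED = {"+", "#", "*", ">", "$"}
--
-- def sanitize_mqtt_topic(topic_name: str) -> str:
--     # Single pass over the characters; the leading-'$' fixup is unreachable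
--     # once every '$' has been replaced, so it is omitted.
--     return "".join("_" if c in RESTRICTED else c for c in topic_name)
-- ===== Notes on version B (the rewrite author's own statement) =====
-- stated objective: simpler
-- what changed: One left-to-right pass mapping each character through a set-membership test replaces A's loop of five whole-string .replace scans plus a startswith branch that is unreachable after the replacements.
import Mathlib
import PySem

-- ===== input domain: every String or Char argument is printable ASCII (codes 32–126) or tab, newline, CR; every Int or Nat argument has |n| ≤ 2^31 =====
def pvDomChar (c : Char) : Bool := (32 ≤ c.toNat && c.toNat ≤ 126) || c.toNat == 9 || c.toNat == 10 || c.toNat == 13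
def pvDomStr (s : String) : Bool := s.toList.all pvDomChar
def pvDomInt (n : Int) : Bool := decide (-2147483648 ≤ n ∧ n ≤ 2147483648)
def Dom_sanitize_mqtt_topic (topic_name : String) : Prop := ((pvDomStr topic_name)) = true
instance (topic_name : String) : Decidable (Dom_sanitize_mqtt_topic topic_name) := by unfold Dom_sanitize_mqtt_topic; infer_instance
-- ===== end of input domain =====

-- B replaces A's five sequential whole-string replace scans (and a branch unreachable after them)
-- with a single character-by-character pass; objective: simpler.


-- ===== PORT A =====
def MQTT_TOPIC_EXCLUSION_CHARS : List String := ["+", "#", "*", ">", "$"]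

def sanitize_mqtt_topic (topic_name : String) : String :=
  let sanitized_name :=
    MQTT_TOPIC_EXCLUSION_CHARS.foldl (fun s ch => PySem.Str.replace s ch "_") topic_name
  if PySem.Str.startswith sanitized_name "$" &&
     !(PySem.Str.startswith sanitized_name "$SYS/" ||
       PySem.Str.startswith sanitized_name "$share/" ||
       PySem.Str.startswith sanitized_name "$noexport/") then
    "_" ++ PySem.Str.slice sanitized_name (some 1) none
  else
    sanitized_name

-- ===== PORT B =====
def pvRestricted : List Char := ['+', '#', '*', '>', '$']

def sanitize_mqtt_topic_alt (topic_name : String) : String :=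
  String.ofList (topic_name.toList.map (fun c => if c ∈ pvRestricted then '_' else c))

-- ===== PRECONDITION & SPEC =====
def Spec_sanitize_mqtt_topic (topic_name : String) (out : String) : Prop := out = sanitize_mqtt_topic_alt topic_name
instance (topic_name : String) (out : String) : Decidable (Spec_sanitize_mqtt_topic topic_name out) := by unfold Spec_sanitize_mqtt_topic; infer_instance

-- ===== CLAIM (what is proved, stated in full; the proofs are below) =====
def Claim_equal_sanitize_mqtt_topic : Prop := ∀ (topic_name : String), Dom_sanitize_mqtt_topic topic_name → Spec_sanitize_mqtt_topic topic_name (sanitize_mqtt_topic topic_name)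

-- ===== LEMMAS AND PROOFS =====

-- replace.go with a single-character pattern is a pointwise map (given enough fuel)
theorem pv_go_single (c d : Char) :
    ∀ (l acc : List Char) (fuel : Nat), l.length ≤ fuel →
      PySem.Chars.replace.go [c] [d] fuel l acc
        = acc.reverse ++ l.map (fun x => if x = c then d else x) := by
  intro l
  induction l with
  | nil =>
    intro acc fuel _
    cases fuel <;> simp [PySem.Chars.replace.go]
  | cons x t ih =>
    intro acc fuel h
    cases fuel with
    | zero => simp at h
    | succ n =>
      simp only [PySem.Chars.replace.go]
      by_cases hx : x = c
      · subst hx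
        rw [if_pos (by simp [List.isPrefixOf])]
        rw [show List.drop [x].length (x :: t) = t from rfl]
        rw [ih ((([d]).reverse) ++ acc) n (by simpa using Nat.le_of_succ_le_succ h)]
        simp only [List.reverse_cons, List.reverse_nil, List.nil_append, List.map_cons,
          List.append_assoc, List.singleton_append, if_true]
      · rw [if_neg (by
          intro hpre
          simp [List.isPrefixOf] at hpre
          exact hx hpre.symm)]
        rw [ih (x :: acc) n (by simpa using Nat.le_of_succ_le_succ h)]
        simp only [List.reverse_cons, List.map_cons, if_neg hx, List.append_assoc,
          List.singleton_append]

theorem pv_replace_single (s : List Char) (c d : Char) :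
    PySem.Chars.replace s [c] [d] = s.map (fun x => if x = c then d else x) := by
  unfold PySem.Chars.replace
  rw [if_neg (by simp)]
  simpa using pv_go_single c d s [] s.length (le_refl _)

-- the five replaces of A are the single map of B
theorem pv_folded (s : String) :
    (MQTT_TOPIC_EXCLUSION_CHARS.foldl (fun s ch => PySem.Str.replace s ch "_") s).toList
      = s.toList.map (fun c => if c ∈ pvRestricted then '_' else c) := by
  simp only [MQTT_TOPIC_EXCLUSION_CHARS, List.foldl, PySem.Str.toList_replace]
  have h1 : ("+" : String).toList = ['+'] := rfl
  have h2 : ("#" : String).toList = ['#'] := rfl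
  have h3 : ("*" : String).toList = ['*'] := rfl
  have h4 : (">" : String).toList = ['>'] := rfl
  have h5 : ("$" : String).toList = ['$'] := rfl
  have hu : ("_" : String).toList = ['_'] := rfl
  rw [h1, h2, h3, h4, h5, hu]
  simp only [pv_replace_single]
  simp only [List.map_map]
  refine List.map_congr_left (fun x _ => ?_)
  simp only [Function.comp, pvRestricted, List.mem_cons, List.not_mem_nil, or_false]
  by_cases h1' : x = '+' <;> by_cases h2' : x = '#' <;> by_cases h3' : x = '*' <;>
    by_cases h4' : x = '>' <;> by_cases h5' : x = '$' <;> simp_all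

-- no '$' survives the map, so A's leading-'$' branch never fires
theorem pv_no_dollar (s : String) :
    PySem.Chars.startswith
      (MQTT_TOPIC_EXCLUSION_CHARS.foldl (fun s ch => PySem.Str.replace s ch "_") s).toList ['$'] = false := by
  by_contra h
  rw [Bool.not_eq_false, PySem.Chars.startswith_iff] at h
  obtain ⟨t, ht⟩ := h
  have := congrArg (fun l => l[0]?) ht
  rw [pv_folded] at this
  simp at this
  cases hL : s.toList with
  | nil => rw [hL] at this; simp at this
  | cons a as =>
    rw [hL] at this
    simp only [List.getElem?_cons_zero] at this
    have h2 : (if a ∈ pvRestricted then '_' else a) = '$' := by simpa using this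
    split_ifs at h2 with ha
    · exact absurd h2 (by decide)
    · exact ha (by rw [h2]; decide)

-- ===== VERDICT (by name: the statement is the Claim_ definition above) =====
theorem sanitize_mqtt_topic_spec : Claim_equal_sanitize_mqtt_topic := by
  intro s _
  unfold Spec_sanitize_mqtt_topic sanitize_mqtt_topic sanitize_mqtt_topic_alt
  rw [if_neg (by simp [pv_no_dollar])]
  apply String.ext
  rw [pv_folded]
  rw [String.toList_ofList]
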